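-- pv_equiv track=rewrite | github.com/johnrain9/aimSoloAnalysis | tools/unified_scorecard.py | _rollup_overall_status
-- ===== SOURCE A (Python) =====
-- from typing import Any, Dict, List, Optional, Tuple
--
-- def _rollup_overall_status(hard_gates: List[Dict[str, Any]]) -> str:
--     """Apply rollup precedence rules per TA v1.0.
--
--     Precedence order (highest to lowest):
--     1. If any gate is fail → overall = fail
--     2. If any gate is blocked → overall = blocked
--     3. If any gate is not_ready → overall = not_ready
--     4. If all gates are pass → overall = pass
--     """
--     statuses = [gate["status"] for gate in hard_gates]
--
--     if "fail" in statuses: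
--         return "fail"
--     if "blocked" in statuses:
--         return "blocked"
--     if "not_ready" in statuses:
--         return "not_ready"
--
--     return "pass"
-- ===== SOURCE B (Python) =====
-- def _rollup_overall_status(hard_gates):
--     statuses = [gate["status"] for gate in hard_gates]
--     rank = {"fail": 3, "blocked": 2, "not_ready": 1}
--     best = 0
--     for s in statuses:
--         best = max(best, rank.get(s, 0))
--     return {3: "fail", 2: "blocked", 1: "not_ready"}.get(best, "pass")
-- ===== Notes on version B (the rewrite author's own statement) =====
-- stated objective: alternative
-- what changed: Replaced the three separate membership scans over the status list by one pass computing the maximum precedence rank (fail=3, blocked=2, not_ready=1, other=0) and a final rank-to-status lookup.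
import Mathlib
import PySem

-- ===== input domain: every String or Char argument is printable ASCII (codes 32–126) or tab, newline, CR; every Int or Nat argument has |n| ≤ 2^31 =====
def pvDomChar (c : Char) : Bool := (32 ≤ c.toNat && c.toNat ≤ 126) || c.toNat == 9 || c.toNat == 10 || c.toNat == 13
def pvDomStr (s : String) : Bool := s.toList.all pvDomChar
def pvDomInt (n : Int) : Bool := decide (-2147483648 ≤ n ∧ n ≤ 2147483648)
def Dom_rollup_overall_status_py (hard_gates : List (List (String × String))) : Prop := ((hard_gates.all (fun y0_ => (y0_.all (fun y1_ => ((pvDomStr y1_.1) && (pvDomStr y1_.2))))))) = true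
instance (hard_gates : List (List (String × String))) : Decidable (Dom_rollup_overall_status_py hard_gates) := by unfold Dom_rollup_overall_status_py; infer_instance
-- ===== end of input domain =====

-- B differs from A by one ranking pass plus a rank→status lookup instead of three
-- membership scans; equivalence is about the return value on inputs where every
-- gate carries a "status" key (elsewhere the Python A raises KeyError).

-- gate["status"]: first-match association-list lookup; total form used only under
-- Pre_ (every gate has the key), where the default "" is never taken
def pvStatusOf (g : List (String × String)) : String :=
  ((g.find? (fun p => p.1 == "status")).map Prod.snd).getD ""

-- ===== PORT A =====
def rollup_overall_status_py (hard_gates : List (List (String × String))) : String :=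
  let statuses := hard_gates.map pvStatusOf
  if statuses.contains "fail" then "fail"
  else if statuses.contains "blocked" then "blocked"
  else if statuses.contains "not_ready" then "not_ready"
  else "pass"

-- ===== PORT B =====
-- rank.get(s, 0) on the literal dict {"fail": 3, "blocked": 2, "not_ready": 1}
def pvRank (s : String) : Nat :=
  if s == "fail" then 3 else if s == "blocked" then 2 else if s == "not_ready" then 1 else 0

-- {3: "fail", 2: "blocked", 1: "not_ready"}.get(best, "pass")
def pvUnrank (n : Nat) : String :=
  if n == 3 then "fail" else if n == 2 then "blocked" else if n == 1 then "not_ready" else "pass"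

def rollup_overall_status_py_alt (hard_gates : List (List (String × String))) : String :=
  let statuses := hard_gates.map pvStatusOf
  pvUnrank (statuses.foldl (fun best s => max best (pvRank s)) 0)

-- ===== PRECONDITION & SPEC =====
-- Pre_ excludes exactly the inputs on which A raises KeyError: a gate without a "status" key.
def Pre_rollup_overall_status_py (hard_gates : List (List (String × String))) : Prop :=
  ∀ g ∈ hard_gates, "status" ∈ g.map Prod.fst
instance (hard_gates : List (List (String × String))) : Decidable (Pre_rollup_overall_status_py hard_gates) := by unfold Pre_rollup_overall_status_py; infer_instance

def pvWitness_rollup_overall_status_py : (List (List (String × String))) :=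
  [[("status", "pass")], [("status", "blocked"), ("note", "x")]]

def Spec_rollup_overall_status_py (hard_gates : List (List (String × String))) (out : String) : Prop := out = rollup_overall_status_py_alt hard_gates
instance (hard_gates : List (List (String × String))) (out : String) : Decidable (Spec_rollup_overall_status_py hard_gates out) := by unfold Spec_rollup_overall_status_py; infer_instance

-- ===== CLAIM (what is proved, stated in full; the proofs are below) =====
def Claim_equal_rollup_overall_status_py : Prop := ∀ (hard_gates : List (List (String × String))), Dom_rollup_overall_status_py hard_gates → Pre_rollup_overall_status_py hard_gates → Spec_rollup_overall_status_py hard_gates (rollup_overall_status_py hard_gates)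

-- ===== LEMMAS AND PROOFS =====

-- right-fold form of B's running maximum
def pvMaxRank (s : List String) : Nat := s.foldr (fun x m => max (pvRank x) m) 0

theorem pvFoldl_eq_maxRank (s : List String) (acc : Nat) :
    s.foldl (fun best x => max best (pvRank x)) acc = max acc (pvMaxRank s) := by
  induction s generalizing acc with
  | nil => simp [pvMaxRank]
  | cons x t ih => simp [pvMaxRank, List.foldl, ih, Nat.max_assoc]

theorem pvMaxRank_le (s : List String) : pvMaxRank s ≤ 3 := by
  induction s with
  | nil => simp [pvMaxRank]
  | cons x t ih =>
    simp only [pvMaxRank, List.foldr] at *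
    have : pvRank x ≤ 3 := by unfold pvRank; split_ifs <;> omega
    omega

theorem pvRank_eq_three (x : String) : 3 ≤ pvRank x ↔ x = "fail" := by
  unfold pvRank; split_ifs with h1 h2 h3 <;> simp_all

theorem pvRank_ge_two (x : String) : 2 ≤ pvRank x ↔ x = "fail" ∨ x = "blocked" := by
  unfold pvRank; split_ifs with h1 h2 h3 <;> simp_all

theorem pvRank_ge_one (x : String) : 1 ≤ pvRank x ↔ x = "fail" ∨ x = "blocked" ∨ x = "not_ready" := by
  unfold pvRank; split_ifs with h1 h2 h3 <;> simp_all

theorem pvMaxRank_ge_iff (s : List String) (P : String → Prop) (k : Nat)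
    (hk : ∀ x, k ≤ pvRank x ↔ P x) (hk0 : 0 < k) :
    k ≤ pvMaxRank s ↔ ∃ x ∈ s, P x := by
  induction s with
  | nil => simp [pvMaxRank]; omega
  | cons x t ih =>
    simp only [pvMaxRank, List.foldr] at *
    constructor
    · intro h
      rcases le_max_iff.mp h with h | h
      · exact ⟨x, by simp, (hk x).mp h⟩
      · rcases ih.mp h with ⟨y, hy, hPy⟩
        exact ⟨y, by simp [hy], hPy⟩
    · rintro ⟨y, hy, hPy⟩
      rcases List.mem_cons.mp hy with rfl | hy
      · exact le_max_iff.mpr (Or.inl ((hk y).mpr hPy))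
      · exact le_max_iff.mpr (Or.inr (ih.mpr ⟨y, hy, hPy⟩))

theorem pvKey (s : List String) :
    (if s.contains "fail" then "fail"
     else if s.contains "blocked" then "blocked"
     else if s.contains "not_ready" then "not_ready"
     else "pass") = pvUnrank (s.foldl (fun best x => max best (pvRank x)) 0) := by
  rw [pvFoldl_eq_maxRank]
  have hle := pvMaxRank_le s
  have h3 := pvMaxRank_ge_iff s (fun x => x = "fail") 3 pvRank_eq_three (by omega)
  have h2 := pvMaxRank_ge_iff s (fun x => x = "fail" ∨ x = "blocked") 2 pvRank_ge_two (by omega)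
  have h1 := pvMaxRank_ge_iff s (fun x => x = "fail" ∨ x = "blocked" ∨ x = "not_ready") 1 pvRank_ge_one (by omega)
  simp only [List.contains_iff_mem]
  by_cases hf : "fail" ∈ s
  · have : pvMaxRank s = 3 := by
      have := h3.mpr ⟨"fail", hf, rfl⟩; omega
    simp [hf, this, pvUnrank]
  · by_cases hb : "blocked" ∈ s
    · have hm2 : 2 ≤ pvMaxRank s := h2.mpr ⟨"blocked", hb, Or.inr rfl⟩
      have hm3 : ¬ 3 ≤ pvMaxRank s := by
        intro h; rcases h3.mp h with ⟨y, hy, rfl⟩; exact hf hy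
      have : pvMaxRank s = 2 := by omega
      simp [hf, hb, this, pvUnrank]
    · by_cases hn : "not_ready" ∈ s
      · have hm1 : 1 ≤ pvMaxRank s := h1.mpr ⟨"not_ready", hn, Or.inr (Or.inr rfl)⟩
        have hm2 : ¬ 2 ≤ pvMaxRank s := by
          intro h; rcases h2.mp h with ⟨y, hy, rfl | rfl⟩
          · exact hf hy
          · exact hb hy
        have : pvMaxRank s = 1 := by omega
        simp [hf, hb, hn, this, pvUnrank]
      · have hm1 : ¬ 1 ≤ pvMaxRank s := by
          intro h; rcases h1.mp h with ⟨y, hy, rfl | rfl | rfl⟩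
          · exact hf hy
          · exact hb hy
          · exact hn hy
        have : pvMaxRank s = 0 := by omega
        simp [hf, hb, hn, this, pvUnrank]

-- ===== VERDICT (by name: the statement is the Claim_ definition above) =====
theorem rollup_overall_status_py_spec : Claim_equal_rollup_overall_status_py := by
  intro hg _ _
  show rollup_overall_status_py hg = rollup_overall_status_py_alt hg
  unfold rollup_overall_status_py rollup_overall_status_py_alt
  exact pvKey (hg.map pvStatusOf)
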